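-- pv_equiv track=rewrite | github.com/AvigailHagay/NLP_ex1 | ex1.py | count
-- ===== SOURCE A (Python) =====
-- def count(smlxWord, wikWord, content, size):
--
--     counter = 0
--     if smlxWord in content and wikWord in content:
--         for posSmlx in content[smlxWord]:
--             for posWik in content[wikWord]:
--                 if posSmlx[0] == posWik[0] and abs(posSmlx[1] - posWik[1]) <= size:
--                     counter += 1
--     return counter
-- ===== SOURCE B (Python) =====
-- def count(smlxWord, wikWord, content, size):
--     if smlxWord not in content or wikWord not in content:
--         return 0
--     byDoc = {}
--     for doc, pos in content[wikWord]:
--         byDoc.setdefault(doc, []).append(pos)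
--     total = 0
--     for doc, pos in content[smlxWord]:
--         total += sum(1 for y in byDoc.get(doc, []) if abs(pos - y) <= size)
--     return total
-- ===== Notes on version B (the rewrite author's own statement) =====
-- stated objective: alternative
-- what changed: B indexes the wik positions by document id in a dict built once, so each smlx position is compared only against same-document positions instead of scanning the whole wik list.
import Mathlib
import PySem

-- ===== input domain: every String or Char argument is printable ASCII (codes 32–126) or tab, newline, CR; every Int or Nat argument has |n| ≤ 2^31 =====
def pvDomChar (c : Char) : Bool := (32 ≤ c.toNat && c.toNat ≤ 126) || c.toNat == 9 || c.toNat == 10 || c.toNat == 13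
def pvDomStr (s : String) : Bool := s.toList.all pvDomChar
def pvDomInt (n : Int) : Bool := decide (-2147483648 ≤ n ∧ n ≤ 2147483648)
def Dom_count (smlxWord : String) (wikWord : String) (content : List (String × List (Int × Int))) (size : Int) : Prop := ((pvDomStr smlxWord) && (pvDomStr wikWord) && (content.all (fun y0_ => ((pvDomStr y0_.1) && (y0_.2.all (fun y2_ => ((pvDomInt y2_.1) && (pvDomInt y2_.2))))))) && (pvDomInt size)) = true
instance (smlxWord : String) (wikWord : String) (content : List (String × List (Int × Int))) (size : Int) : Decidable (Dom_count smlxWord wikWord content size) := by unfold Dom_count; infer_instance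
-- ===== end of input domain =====

-- B builds a dict indexing the wik positions by document id once, so each smlx
-- position is compared only against same-document positions (alternative
-- decomposition; A scans the whole wik list for every smlx position).

-- ===== PORT A =====
def count (smlxWord : String) (wikWord : String) (content : List (String × List (Int × Int))) (size : Int) : Int :=
  let d := PySem.Dict.mk content
  if d.contains smlxWord && d.contains wikWord then
    (d.getD smlxWord []).foldl (fun counter posSmlx =>
      (d.getD wikWord []).foldl (fun counter posWik =>
        if posSmlx.1 = posWik.1 ∧ |posSmlx.2 - posWik.2| ≤ size then counter + 1 else counter)
        counter) 0
  else 0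

-- ===== PORT B =====
def count_alt (smlxWord : String) (wikWord : String) (content : List (String × List (Int × Int))) (size : Int) : Int :=
  let d := PySem.Dict.mk content
  match d.get? smlxWord, d.get? wikWord with
  | some ps, some qs =>
    let byDoc := qs.foldl (fun b q => b.modify q.1 [] (· ++ [q.2])) (PySem.Dict.empty : PySem.Dict Int (List Int))
    ps.foldl (fun total p =>
      total + ((byDoc.getD p.1 []).countP (fun y => decide (|p.2 - y| ≤ size)) : Int)) 0
  | _, _ => 0

-- ===== PRECONDITION & SPEC =====
def Spec_count (smlxWord : String) (wikWord : String) (content : List (String × List (Int × Int))) (size : Int) (out : Int) : Prop := out = count_alt smlxWord wikWord content size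
instance (smlxWord : String) (wikWord : String) (content : List (String × List (Int × Int))) (size : Int) (out : Int) : Decidable (Spec_count smlxWord wikWord content size out) := by unfold Spec_count; infer_instance

-- ===== CLAIM (what is proved, stated in full; the proofs are below) =====
def Claim_equal_count : Prop := ∀ (smlxWord : String) (wikWord : String) (content : List (String × List (Int × Int))) (size : Int), Dom_count smlxWord wikWord content size → Spec_count smlxWord wikWord content size (count smlxWord wikWord content size)

-- ===== LEMMAS AND PROOFS =====

-- per-smlx-position counts agree: grouping by doc then counting the window
-- equals counting the conjunction over the whole wik list
theorem pv_inner_eq (qs : List (Int × Int)) (p : Int × Int) (size : Int) :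
    (((qs.foldl (fun b q => b.modify q.1 [] (· ++ [q.2]))
        (PySem.Dict.empty : PySem.Dict Int (List Int))).getD p.1 []).countP
          (fun y => decide (|p.2 - y| ≤ size)) : Int)
      = (qs.countP (fun q => decide (p.1 = q.1 ∧ |p.2 - q.2| ≤ size)) : Int) := by
  rw [PySem.Dict.getD_foldl_modify_append, PySem.Dict.getD_empty]
  simp only [List.nil_append, List.countP_map, List.countP_filter]
  congr 1
  apply List.countP_congr
  intro q _
  simp only [Function.comp_apply]
  by_cases h1 : p.1 = q.1 <;> by_cases h2 : |p.2 - q.2| ≤ size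
  · simp [h1, h2]
  · simp [h1, h2]
  · simp [h2]; omega
  · simp [h2]

theorem count_eq (smlxWord : String) (wikWord : String) (content : List (String × List (Int × Int))) (size : Int) :
    count smlxWord wikWord content size = count_alt smlxWord wikWord content size := by
  unfold count count_alt
  set d := PySem.Dict.mk content with hd
  have hcs : d.contains smlxWord = (d.get? smlxWord).isSome := PySem.Dict.contains_eq_isSome_get? d smlxWord
  have hcw : d.contains wikWord = (d.get? wikWord).isSome := PySem.Dict.contains_eq_isSome_get? d wikWord
  rcases hs : d.get? smlxWord with _ | ps <;> rcases hw : d.get? wikWord with _ | qs <;>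
    simp only [hcs, hcw, hs, hw, Option.isSome_none, Option.isSome_some,
      Bool.false_and, Bool.and_false, Bool.and_self,
      Bool.false_eq_true, if_false, if_true]
  have hgs : d.getD smlxWord [] = ps := PySem.Dict.getD_of_get?_eq_some d [] hs
  have hgw : d.getD wikWord [] = qs := PySem.Dict.getD_of_get?_eq_some d [] hw
  rw [hgs, hgw]
  have hin : ∀ (c : Int) (p : Int × Int),
      qs.foldl (fun counter posWik =>
        if p.1 = posWik.1 ∧ |p.2 - posWik.2| ≤ size then counter + 1 else counter) c
      = c + ((qs.foldl (fun b q => b.modify q.1 [] (· ++ [q.2]))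
          (PySem.Dict.empty : PySem.Dict Int (List Int))).getD p.1 []).countP
            (fun y => decide (|p.2 - y| ≤ size)) := by
    intro c p
    rw [pv_inner_eq qs p size, PySem.List.foldl_ite_add_one]
  calc ps.foldl (fun (counter : Int) posSmlx =>
        qs.foldl (fun counter posWik =>
          if posSmlx.1 = posWik.1 ∧ |posSmlx.2 - posWik.2| ≤ size then counter + 1 else counter)
          counter) 0
      = ps.foldl (fun (total : Int) p =>
          total + (((qs.foldl (fun b q => b.modify q.1 [] (· ++ [q.2]))
            (PySem.Dict.empty : PySem.Dict Int (List Int))).getD p.1 []).countP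
              (fun y => decide (|p.2 - y| ≤ size)) : Int)) 0 := by
        apply PySem.List.foldl_congr_mem
        intro acc p _
        exact hin acc p
    _ = _ := rfl

-- ===== VERDICT (by name: the statement is the Claim_ definition above) =====
theorem count_spec : Claim_equal_count := by
  intro s w c sz _
  unfold Spec_count
  exact count_eq s w c sz
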